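-- pv_equiv track=rewrite | github.com/Dojodonkey/PY101 | Easy3/clean_up.py | clean_up
-- ===== SOURCE A (Python) =====
-- def clean_up(string):
-- 	cleaned = ''
--
-- 	for char in string:
-- 		if char.isalpha():
-- 			cleaned += char
-- 		else:
-- 			cleaned += ' '
--
-- 	cleaned = ' '.join(cleaned.split())
--
-- 	return cleaned
-- ===== SOURCE B (Python) =====
-- def clean_up(string):
--     words = []
--     buf = ''
--     for char in string:
--         if char.isalpha():
--             buf += char
--         else:
--             if buf:
--                 words.append(buf)
--                 buf = ''
--     if buf:
--         words.append(buf)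
--     return ' '.join(words)
-- ===== Notes on version B (the rewrite author's own statement) =====
-- stated objective: simpler
-- what changed: B accumulates alphabetic runs directly into a word list in one scan and joins them, instead of A's building a space-substituted intermediate string and then split/join
import Mathlib
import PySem

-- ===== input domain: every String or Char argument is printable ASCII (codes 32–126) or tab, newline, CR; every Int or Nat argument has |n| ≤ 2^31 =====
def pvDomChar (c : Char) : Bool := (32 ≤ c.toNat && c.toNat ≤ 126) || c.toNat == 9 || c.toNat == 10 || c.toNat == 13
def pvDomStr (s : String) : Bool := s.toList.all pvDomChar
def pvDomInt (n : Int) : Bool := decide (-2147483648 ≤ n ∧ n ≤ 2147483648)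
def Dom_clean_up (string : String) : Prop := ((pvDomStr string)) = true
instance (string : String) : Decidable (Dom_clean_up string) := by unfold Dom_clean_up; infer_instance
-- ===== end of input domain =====

-- B replaces A's replace-then-split-then-join pipeline with a single scan that
-- accumulates alphabetic runs into a word list and joins them (objective: simpler).

-- ===== PORT A =====
-- A: build 'cleaned' by appending, per char, the char (if alphabetic) or a space;
--    then ' '.join(cleaned.split()).
def clean_up (string : String) : String :=
  let cleaned : List Char :=
    string.toList.foldl
      (fun acc c => acc ++ [if PySem.Chars.isalpha c then c else ' ']) []
  String.mk (PySem.Chars.join [' '] (PySem.Chars.split₀ cleaned))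

-- ===== PORT B =====
-- B: one pass keeping (words, buf); alphabetic chars extend buf, any other char
--    flushes a non-empty buf into words; flush the tail buf, then join with ' '.
def clean_up_alt (string : String) : String :=
  let st : List (List Char) × List Char :=
    string.toList.foldl
      (fun (st : List (List Char) × List Char) c =>
        if PySem.Chars.isalpha c then (st.1, st.2 ++ [c])
        else if st.2 = [] then st else (st.1 ++ [st.2], []))
      ([], [])
  let words := if st.2 = [] then st.1 else st.1 ++ [st.2]
  String.mk (PySem.Chars.join [' '] words)

-- ===== PRECONDITION & SPEC =====
def Spec_clean_up (string : String) (out : String) : Prop := out = clean_up_alt string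
instance (string : String) (out : String) : Decidable (Spec_clean_up string out) := by unfold Spec_clean_up; infer_instance

-- ===== CLAIM (what is proved, stated in full; the proofs are below) =====
def Claim_equal_clean_up : Prop := ∀ (string : String), Dom_clean_up string → Spec_clean_up string (clean_up string)

-- ===== LEMMAS AND PROOFS =====

theorem pv_isspace_of_isalpha (c : Char) (h : PySem.Chars.isalpha c = true) :
    PySem.Chars.isspace c = false := by
  simp only [PySem.Chars.isalpha, PySem.Chars.isupper, PySem.Chars.islower, Char.le_def,
    UInt32.le_iff_toNat_le, Bool.or_eq_true, Bool.and_eq_true, decide_eq_true_iff,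
    show 'A'.val.toNat = 65 from rfl, show 'Z'.val.toNat = 90 from rfl,
    show 'a'.val.toNat = 97 from rfl, show 'z'.val.toNat = 122 from rfl] at h
  simp only [PySem.Chars.isspace, Char.toNat, Bool.or_eq_false_iff, Bool.and_eq_false_iff,
    decide_eq_false_iff_not]
  omega

-- A's character-appending loop builds the pointwise image of the string.
theorem pv_foldl_map (l acc : List Char) :
    l.foldl (fun acc c => acc ++ [if PySem.Chars.isalpha c then c else ' ']) acc
      = acc ++ l.map (fun c => if PySem.Chars.isalpha c then c else ' ') := by
  induction l generalizing acc with
  | nil => simp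
  | cons c t ih => simp [List.foldl, ih]

-- Core invariant: split₀'s scan over the space-substituted list agrees with B's
-- (words, buf) fold, given matching initial states.
theorem pv_go_eq_fold (l : List Char) (cur : List Char) (acc : List (List Char)) :
    PySem.Chars.split₀.go (l.map (fun c => if PySem.Chars.isalpha c then c else ' ')) cur acc
      = (let st := l.foldl
            (fun (st : List (List Char) × List Char) c =>
              if PySem.Chars.isalpha c then (st.1, st.2 ++ [c])
              else if st.2 = [] then st else (st.1 ++ [st.2], []))
            (acc.reverse, cur.reverse)
         if st.2 = [] then st.1 else st.1 ++ [st.2]) := by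
  induction l generalizing cur acc with
  | nil =>
    simp only [List.map_nil, PySem.Chars.split₀.go, List.foldl_nil, List.isEmpty_iff]
    by_cases h : cur = []
    · simp [h]
    · have : cur.reverse ≠ [] := by simpa using h
      simp [h, this]
  | cons c t ih =>
    by_cases ha : PySem.Chars.isalpha c = true
    · have hs := pv_isspace_of_isalpha c ha
      simp only [List.map_cons, ha, if_pos, PySem.Chars.split₀.go, hs, List.foldl_cons]
      have := ih (c :: cur) acc
      simpa using this
    · have hc : (if PySem.Chars.isalpha c then c else ' ') = ' ' := by simp [ha]
      simp only [List.map_cons, hc, PySem.Chars.split₀.go,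
        show PySem.Chars.isspace ' ' = true from rfl, if_pos, List.foldl_cons,
        List.isEmpty_iff, ha, if_neg, Bool.false_eq_true, not_false_iff]
      by_cases h : cur = []
      · have : cur.reverse = [] := by simp [h]
        simp only [h, if_pos, this]
        simpa using ih [] acc
      · have hr : cur.reverse ≠ [] := by simpa using h
        simp only [h, if_neg, hr]
        have := ih [] (cur.reverse :: acc)
        simpa using this

-- ===== VERDICT (by name: the statement is the Claim_ definition above) =====
theorem clean_up_spec : Claim_equal_clean_up := by
  intro s _
  unfold Spec_clean_up clean_up clean_up_alt
  simp only [pv_foldl_map, List.nil_append, PySem.Chars.split₀]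
  have := pv_go_eq_fold s.toList [] []
  simp only [List.reverse_nil] at this
  rw [this]
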